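-- pv_equiv track=rewrite | github.com/jar398/cldiff | src/report.py | find_changed_merged_subtrees
-- ===== SOURCE A (Python) =====
-- def find_changed_merged_subtrees(roots, children):
--   status = {}
--   def process(node):
--     node_changed = False
--     (x, y) = node
--     if not x or not y:
--       node_changed = True
--     descendant_changed = False
--     for child in children.get(node, []):
--       if process(child):
--         descendant_changed = True
--     status[node] = descendant_changed       # Cache it
--     return descendant_changed or node_changed
--   for root in roots:
--     process(root)
--   return status
-- ===== SOURCE B (Python) =====
-- def find_changed_merged_subtrees(roots, children):
--   # Different decomposition: a pure recursive predicate `changed` (node or any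
--   # descendant changed) separated from a post-order `visit` pass that fills the
--   # status dict, instead of A's single recursion threading the flag upward.
--   def changed(node):
--     x, y = node
--     return (not x or not y) or any(changed(c) for c in children.get(node, ()))
--   status = {}
--   def visit(node):
--     kids = children.get(node, [])
--     for c in kids:
--       visit(c)
--     status[node] = any(changed(c) for c in kids)
--   for r in roots:
--     visit(r)
--   return status
-- ===== Notes on version B (the rewrite author's own statement) =====
-- stated objective: alternative
-- what changed: A threads a descendant-changed boolean upward through one mutating recursion; B separates a pure recursive subtree-changed predicate from a post-order visiting pass that fills the status dict, trading the threaded accumulator for recomputation.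
import Mathlib
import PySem

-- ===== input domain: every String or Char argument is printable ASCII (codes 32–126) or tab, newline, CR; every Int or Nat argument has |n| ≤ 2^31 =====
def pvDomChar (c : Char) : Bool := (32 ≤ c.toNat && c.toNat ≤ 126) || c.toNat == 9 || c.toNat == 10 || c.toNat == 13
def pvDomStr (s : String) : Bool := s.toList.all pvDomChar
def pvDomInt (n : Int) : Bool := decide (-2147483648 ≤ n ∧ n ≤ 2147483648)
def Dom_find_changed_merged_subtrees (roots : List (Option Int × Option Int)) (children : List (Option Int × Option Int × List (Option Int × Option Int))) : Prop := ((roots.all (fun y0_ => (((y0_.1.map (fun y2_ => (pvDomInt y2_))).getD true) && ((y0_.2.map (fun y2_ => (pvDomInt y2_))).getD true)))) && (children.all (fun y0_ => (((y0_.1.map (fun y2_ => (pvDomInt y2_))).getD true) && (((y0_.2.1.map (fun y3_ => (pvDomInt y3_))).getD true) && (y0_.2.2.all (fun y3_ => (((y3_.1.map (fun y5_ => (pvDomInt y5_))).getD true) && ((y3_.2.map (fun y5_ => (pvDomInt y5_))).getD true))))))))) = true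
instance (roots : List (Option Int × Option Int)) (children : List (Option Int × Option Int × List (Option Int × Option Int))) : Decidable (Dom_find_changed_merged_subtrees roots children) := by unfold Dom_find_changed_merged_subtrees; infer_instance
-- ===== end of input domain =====

-- ===== PORT A =====
-- B separates a pure subtree-changed predicate from a post-order status-filling pass
-- (alternative decomposition, not faster); equivalence is about the return value.

-- Python falsiness of an Optional[int]: None and 0 are falsy.
def pvFalsy (o : Option Int) : Bool :=
  match o with
  | none => true
  | some v => v == 0

-- children.get(node, []) on the association list (first match).
def pvKids (children : List (Option Int × Option Int × List (Option Int × Option Int)))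
    (n : Option Int × Option Int) : List (Option Int × Option Int) :=
  match children.find? (fun e => (e.1, e.2.1) == n) with
  | some e => e.2.2
  | none => []

-- A's `process`: fuel only makes the recursion total; under Pre_ (acyclic from
-- the roots) the depth never exceeds children.length + 1.
def pvProcessA (children : List (Option Int × Option Int × List (Option Int × Option Int))) :
    Nat → (Option Int × Option Int) → PySem.Dict (Option Int × Option Int) Bool →
    PySem.Dict (Option Int × Option Int) Bool × Bool
  | 0, _, st => (st, false)
  | f+1, node, st =>
    let node_changed := pvFalsy node.1 || pvFalsy node.2
    let p := (pvKids children node).foldl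
      (fun acc c =>
        let r := pvProcessA children f c acc.1
        (r.1, acc.2 || r.2)) (st, false)
    (p.1.insert node p.2, p.2 || node_changed)

def find_changed_merged_subtrees (roots : List (Option Int × Option Int)) (children : List (Option Int × Option Int × List (Option Int × Option Int))) : List (Option Int × Option Int × Bool) :=
  let fuel := children.length + 1
  let st := roots.foldl (fun st r => (pvProcessA children fuel r st).1) PySem.Dict.empty
  st.items.map (fun e => (e.1.1, e.1.2, e.2))

-- ===== PORT B =====
-- pure predicate: node (or some descendant) changed
def pvChangedB (children : List (Option Int × Option Int × List (Option Int × Option Int))) :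
    Nat → (Option Int × Option Int) → Bool
  | 0, _ => false
  | f+1, n => (pvFalsy n.1 || pvFalsy n.2) || (pvKids children n).any (pvChangedB children f)

-- post-order pass filling the status dict
def pvVisitB (children : List (Option Int × Option Int × List (Option Int × Option Int))) :
    Nat → (Option Int × Option Int) → PySem.Dict (Option Int × Option Int) Bool →
    PySem.Dict (Option Int × Option Int) Bool
  | 0, _, st => st
  | f+1, n, st =>
    let kids := pvKids children n
    let st' := kids.foldl (fun st c => pvVisitB children f c st) st
    st'.insert n (kids.any (pvChangedB children f))

def find_changed_merged_subtrees_alt (roots : List (Option Int × Option Int)) (children : List (Option Int × Option Int × List (Option Int × Option Int))) : List (Option Int × Option Int × Bool) :=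
  let fuel := children.length + 1
  let st := roots.foldl (fun st r => pvVisitB children fuel r st) PySem.Dict.empty
  st.items.map (fun e => (e.1.1, e.1.2, e.2))

-- ===== PRECONDITION & SPEC =====
-- one expansion step of the child relation
def pvStep (children : List (Option Int × Option Int × List (Option Int × Option Int)))
    (S : List (Option Int × Option Int)) : List (Option Int × Option Int) :=
  PySem.List.dedup (S ++ S.flatMap (pvKids children))

-- all nodes reachable from S (enough iterations to reach the fixed point)
def pvReach (children : List (Option Int × Option Int × List (Option Int × Option Int)))
    (S : List (Option Int × Option Int)) : List (Option Int × Option Int) :=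
  (pvStep children)^[S.length + (children.flatMap (fun e => e.2.2)).length + 1] S

-- Pre_ excludes exactly the inputs on which Python A raises RecursionError:
-- a cycle in the child relation reachable from the roots (both Pythons recurse
-- forever there). No input on which A returns normally is excluded.
def Pre_find_changed_merged_subtrees (roots : List (Option Int × Option Int)) (children : List (Option Int × Option Int × List (Option Int × Option Int))) : Prop :=
  ((pvReach children roots).all
    (fun n => !((pvReach children (pvKids children n)).contains n))) = true
instance (roots : List (Option Int × Option Int)) (children : List (Option Int × Option Int × List (Option Int × Option Int))) : Decidable (Pre_find_changed_merged_subtrees roots children) := by unfold Pre_find_changed_merged_subtrees; infer_instance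

def pvWitness_find_changed_merged_subtrees : (List (Option Int × Option Int)) × (List (Option Int × Option Int × List (Option Int × Option Int))) :=
  ([(some 1, some 2)], [(some 1, some 2, [(none, some 3)])])

def Spec_find_changed_merged_subtrees (roots : List (Option Int × Option Int)) (children : List (Option Int × Option Int × List (Option Int × Option Int))) (out : List (Option Int × Option Int × Bool)) : Prop := out = find_changed_merged_subtrees_alt roots children
instance (roots : List (Option Int × Option Int)) (children : List (Option Int × Option Int × List (Option Int × Option Int))) (out : List (Option Int × Option Int × Bool)) : Decidable (Spec_find_changed_merged_subtrees roots children out) := by unfold Spec_find_changed_merged_subtrees; infer_instance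

-- ===== CLAIM (what is proved, stated in full; the proofs are below) =====
def Claim_equal_find_changed_merged_subtrees : Prop := ∀ (roots : List (Option Int × Option Int)) (children : List (Option Int × Option Int × List (Option Int × Option Int))), Dom_find_changed_merged_subtrees roots children → Pre_find_changed_merged_subtrees roots children → Spec_find_changed_merged_subtrees roots children (find_changed_merged_subtrees roots children)

-- ===== LEMMAS AND PROOFS =====

-- A's process equals (B's visit pass, B's changed predicate), for every fuel.
theorem pvProcessA_eq (children : List (Option Int × Option Int × List (Option Int × Option Int))) :
    ∀ (f : Nat) (node : Option Int × Option Int) (st : PySem.Dict (Option Int × Option Int) Bool),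
      pvProcessA children f node st = (pvVisitB children f node st, pvChangedB children f node) := by
  intro f
  induction f with
  | zero => intro node st; simp [pvProcessA, pvVisitB, pvChangedB]
  | succ f ih =>
    have hfold : ∀ (l : List (Option Int × Option Int))
        (st : PySem.Dict (Option Int × Option Int) Bool) (b : Bool),
        l.foldl (fun acc c =>
            (pvVisitB children f c acc.1, acc.2 || pvChangedB children f c)) (st, b)
        = (l.foldl (fun st c => pvVisitB children f c st) st, b || l.any (pvChangedB children f)) := by
      intro l
      induction l with
      | nil => intro st b; simp
      | cons c cs ihl =>
        intro st b
        simp only [List.foldl_cons, List.any_cons]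
        rw [ihl]
        simp [Bool.or_assoc]
    intro node st
    simp only [pvProcessA, pvVisitB, pvChangedB, ih, hfold]
    simp [Bool.or_comm]

theorem pvWitness_ok :
    Dom_find_changed_merged_subtrees pvWitness_find_changed_merged_subtrees.1 pvWitness_find_changed_merged_subtrees.2 ∧
    Pre_find_changed_merged_subtrees pvWitness_find_changed_merged_subtrees.1 pvWitness_find_changed_merged_subtrees.2 := by
  constructor <;> decide

-- ===== VERDICT (by name: the statement is the Claim_ definition above) =====
theorem find_changed_merged_subtrees_spec : Claim_equal_find_changed_merged_subtrees := by
  intro roots children _dom _pre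
  unfold Spec_find_changed_merged_subtrees
  unfold find_changed_merged_subtrees find_changed_merged_subtrees_alt
  have hf : (fun (st : PySem.Dict (Option Int × Option Int) Bool) r =>
      (pvProcessA children (children.length + 1) r st).1)
      = (fun st r => pvVisitB children (children.length + 1) r st) := by
    funext st r
    rw [pvProcessA_eq]
  simp only [hf]
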